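-- pv_equiv track=rewrite | github.com/Suyash458/AoC-2018 | q5.py | get_polymer_length
-- ===== SOURCE A (Python) =====
-- import string
--
-- pairs = ['{}{}'.format(i, i.upper()) for i in string.ascii_lowercase] + ['{}{}'.format(i.upper(), i) for i in string.ascii_lowercase]
--
-- def get_polymer_length(polymer):
--     changed = True
--     original_polymer = polymer
--     while changed:
--         for pair in pairs:
--             polymer = polymer.replace(pair, '')
--         if original_polymer != polymer:
--             original_polymer = polymer
--         else:
--             changed = False
--     return len(polymer)
-- ===== SOURCE B (Python) =====
-- def get_polymer_length(polymer):
--     stack = []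
--     for c in polymer:
--         if stack and stack[-1] != c and stack[-1].lower() == c.lower():
--             stack.pop()
--         else:
--             stack.append(c)
--     return len(stack)
-- ===== Notes on version B (the rewrite author's own statement) =====
-- stated objective: alternative
-- what changed: Replaced the fixpoint loop of 52 whole-string str.replace passes by a single left-to-right stack pass that pops the top of the stack whenever it reacts with the current character.
import Mathlib
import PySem

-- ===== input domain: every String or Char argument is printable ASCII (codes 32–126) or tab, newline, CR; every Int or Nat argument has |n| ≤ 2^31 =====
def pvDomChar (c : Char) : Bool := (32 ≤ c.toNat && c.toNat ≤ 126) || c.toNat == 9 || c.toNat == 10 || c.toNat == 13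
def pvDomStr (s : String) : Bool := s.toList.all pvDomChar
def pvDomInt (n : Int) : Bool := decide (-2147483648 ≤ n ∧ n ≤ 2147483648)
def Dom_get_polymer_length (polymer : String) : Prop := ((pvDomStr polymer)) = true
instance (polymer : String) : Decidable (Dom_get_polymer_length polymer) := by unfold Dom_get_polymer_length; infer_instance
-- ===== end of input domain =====

-- B replaces A's repeated full-string replace() passes until fixpoint by a single left-to-right stack pass (same return value; a genuinely different one-pass algorithm).

-- ===== PORT A =====
-- string.ascii_lowercase
def pvAsciiLowercase : List Char := "abcdefghijklmnopqrstuvwxyz".toList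

-- pairs = ['{}{}'.format(i, i.upper()) for i in ascii_lowercase] + ['{}{}'.format(i.upper(), i) for i in ascii_lowercase]
def pvPairs : List (List Char) :=
  pvAsciiLowercase.map (fun i => [i] ++ PySem.Chars.upper [i]) ++
  pvAsciiLowercase.map (fun i => PySem.Chars.upper [i] ++ [i])

-- the 'for pair in pairs: polymer = polymer.replace(pair, "")' pass
def pvReplacePass (polymer : List Char) : List Char :=
  pvPairs.foldl (fun poly pair => PySem.Chars.replace poly pair []) polymer

-- the 'while changed' loop; fuel (length + 1) only makes the recursion total: each
-- continuing iteration strictly shrinks the polymer, so the fuel is never exhausted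
def pvLoopA : Nat → List Char → List Char → Int
  | 0, polymer, _ => (polymer.length : Int)
  | fuel + 1, polymer, original =>
      let polymer' := pvReplacePass polymer
      if original ≠ polymer' then pvLoopA fuel polymer' polymer'
      else (polymer'.length : Int)

def get_polymer_length (polymer : String) : Int :=
  pvLoopA (polymer.toList.length + 1) polymer.toList polymer.toList

-- ===== PORT B =====
-- stack[-1] != c and stack[-1].lower() == c.lower()
def pvReacts (a b : Char) : Bool := (a != b) && (PySem.Chars.lower [a] == PySem.Chars.lower [b])

-- one loop iteration; the stack is kept top-first
def pvStep (stack : List Char) (c : Char) : List Char :=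
  match stack with
  | [] => [c]
  | t :: r => if pvReacts t c then r else c :: t :: r

def get_polymer_length_alt (polymer : String) : Int :=
  ((polymer.toList.foldl pvStep []).length : Int)

-- ===== PRECONDITION & SPEC =====
def Spec_get_polymer_length (polymer : String) (out : Int) : Prop := out = get_polymer_length_alt polymer
instance (polymer : String) (out : Int) : Decidable (Spec_get_polymer_length polymer out) := by unfold Spec_get_polymer_length; infer_instance

-- ===== CLAIM (what is proved, stated in full; the proofs are below) =====
def Claim_equal_get_polymer_length : Prop := ∀ (polymer : String), Dom_get_polymer_length polymer → Spec_get_polymer_length polymer (get_polymer_length polymer)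

-- ===== LEMMAS AND PROOFS =====

-- remove every occurrence of the two-character pair c,d (what polymer.replace(cd, '') does)
def pvRemoveAll (c d : Char) : List Char → List Char
  | a :: b :: t => if a = c ∧ b = d then pvRemoveAll c d t else a :: pvRemoveAll c d (b :: t)
  | l => l
termination_by l => l.length
decreasing_by all_goals (simp [List.length_cons]; try omega)

-- no two adjacent characters react
def pvIrred (l : List Char) : Prop := List.IsChain (fun a b => pvReacts a b = false) l

theorem pvRemoveAll_nil (c d : Char) : pvRemoveAll c d [] = [] := by
  rw [pvRemoveAll.eq_def]

theorem pvRemoveAll_singleton (c d a : Char) : pvRemoveAll c d [a] = [a] := by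
  rw [pvRemoveAll.eq_def]

-- ---- character-level facts ----
theorem pvReacts_iff (a b : Char) :
    pvReacts a b = true ↔ a ≠ b ∧ PySem.Chars.lowerChar a = PySem.Chars.lowerChar b := by
  simp [pvReacts, PySem.Chars.lower]

theorem pvChar_le_iff (a b : Char) : a ≤ b ↔ a.toNat ≤ b.toNat := by
  simp [Char.le_def, UInt32.le_iff_toNat_le]

theorem pvChar_eq_iff (a b : Char) : a = b ↔ a.toNat = b.toNat := by
  constructor
  · intro h; rw [h]
  · intro h
    have := congrArg Char.ofNat h
    simpa [Char.ofNat_toNat] using this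

theorem pvChar_toNat_ofNat (n : Nat) (h : n < 55296) : (Char.ofNat n).toNat = n := by
  have hv : n.isValidChar := Or.inl h
  rw [Char.ofNat, dif_pos hv]
  simp only [Char.ofNatAux, Char.toNat, UInt32.toNat, BitVec.toNat_ofNatLT]

theorem pvIsupper_iff (c : Char) : PySem.Chars.isupper c = true ↔ 65 ≤ c.toNat ∧ c.toNat ≤ 90 := by
  unfold PySem.Chars.isupper
  simp only [Bool.and_eq_true, decide_eq_true_eq, pvChar_le_iff]
  have hA : 'A'.toNat = 65 := rfl
  have hZ : 'Z'.toNat = 90 := rfl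
  rw [hA, hZ]

theorem pvIslower_iff (c : Char) : PySem.Chars.islower c = true ↔ 97 ≤ c.toNat ∧ c.toNat ≤ 122 := by
  unfold PySem.Chars.islower
  simp only [Bool.and_eq_true, decide_eq_true_eq, pvChar_le_iff]
  have ha : 'a'.toNat = 97 := rfl
  have hz : 'z'.toNat = 122 := rfl
  rw [ha, hz]

theorem pvLower_cases (a b : Char) (hne : a ≠ b)
    (h : PySem.Chars.lowerChar a = PySem.Chars.lowerChar b) :
    (65 ≤ a.toNat ∧ a.toNat ≤ 90 ∧ b.toNat = a.toNat + 32) ∨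
    (65 ≤ b.toNat ∧ b.toNat ≤ 90 ∧ a.toNat = b.toNat + 32) := by
  unfold PySem.Chars.lowerChar at h
  by_cases ha : PySem.Chars.isupper a = true <;> by_cases hb : PySem.Chars.isupper b = true
  · rw [if_pos ha, if_pos hb] at h
    have h2 := congrArg Char.toNat h
    rw [pvChar_toNat_ofNat _ (by have := (pvIsupper_iff a).mp ha; omega),
        pvChar_toNat_ofNat _ (by have := (pvIsupper_iff b).mp hb; omega)] at h2
    exact absurd ((pvChar_eq_iff a b).mpr (by omega)) hne
  · rw [if_pos ha, if_neg hb] at h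
    have h2 := congrArg Char.toNat h.symm
    rw [pvChar_toNat_ofNat _ (by have := (pvIsupper_iff a).mp ha; omega)] at h2
    have := (pvIsupper_iff a).mp ha
    exact Or.inl ⟨this.1, this.2, h2⟩
  · rw [if_neg ha, if_pos hb] at h
    have h2 := congrArg Char.toNat h
    rw [pvChar_toNat_ofNat _ (by have := (pvIsupper_iff b).mp hb; omega)] at h2
    have := (pvIsupper_iff b).mp hb
    exact Or.inr ⟨this.1, this.2, h2⟩
  · rw [if_neg ha, if_neg hb] at h
    exact absurd h hne

theorem pvReacts_symm (a b : Char) : pvReacts a b = pvReacts b a := by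
  rw [Bool.eq_iff_iff, pvReacts_iff, pvReacts_iff]
  exact ⟨fun ⟨h1, h2⟩ => ⟨h1.symm, h2.symm⟩, fun ⟨h1, h2⟩ => ⟨h1.symm, h2.symm⟩⟩

theorem pvReacts_trans_eq (t c d : Char) (h1 : pvReacts t c = true) (h2 : pvReacts c d = true) :
    t = d := by
  rw [pvReacts_iff] at h1 h2
  obtain ⟨hne1, hl1⟩ := h1
  obtain ⟨hne2, hl2⟩ := h2
  rw [pvChar_eq_iff]
  have hne1' : t.toNat ≠ c.toNat := fun hh => hne1 ((pvChar_eq_iff t c).mpr hh)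
  have hne2' : c.toNat ≠ d.toNat := fun hh => hne2 ((pvChar_eq_iff c d).mpr hh)
  rcases pvLower_cases t c hne1 hl1 with ⟨u1, u2, u3⟩ | ⟨u1, u2, u3⟩ <;>
    rcases pvLower_cases c d hne2 hl2 with ⟨v1, v2, v3⟩ | ⟨v1, v2, v3⟩ <;> omega

theorem pvLowercase_map : pvAsciiLowercase.map Char.toNat =
    [97, 98, 99, 100, 101, 102, 103, 104, 105, 106, 107, 108, 109, 110, 111, 112,
     113, 114, 115, 116, 117, 118, 119, 120, 121, 122] := by decide

theorem pvMem_lowercase (c : Char) (h1 : 97 ≤ c.toNat) (h2 : c.toNat ≤ 122) :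
    c ∈ pvAsciiLowercase := by
  have hm : c.toNat ∈ pvAsciiLowercase.map Char.toNat := by
    rw [pvLowercase_map]
    simp only [List.mem_cons, List.not_mem_nil, or_false]
    omega
  obtain ⟨x, hx, hxe⟩ := List.mem_map.mp hm
  have hxc : x = c := (pvChar_eq_iff x c).mpr hxe
  rwa [hxc] at hx

theorem pvUpperChar_eq (b : Char) (h1 : 97 ≤ b.toNat) (h2 : b.toNat ≤ 122) :
    PySem.Chars.upperChar b = Char.ofNat (b.toNat - 32) := by
  unfold PySem.Chars.upperChar
  rw [if_pos ((pvIslower_iff b).mpr ⟨h1, h2⟩)]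

theorem pvReacts_mem_pairs (a b : Char) (h : pvReacts a b = true) : [a, b] ∈ pvPairs := by
  rw [pvReacts_iff] at h
  obtain ⟨hne, hl⟩ := h
  unfold pvPairs
  rcases pvLower_cases a b hne hl with ⟨h1, h2, h3⟩ | ⟨h1, h2, h3⟩
  · refine List.mem_append_right _
      (List.mem_map.mpr ⟨b, pvMem_lowercase b (by omega) (by omega), ?_⟩)
    have hu : PySem.Chars.upperChar b = a := by
      rw [pvUpperChar_eq b (by omega) (by omega), pvChar_eq_iff,
        pvChar_toNat_ofNat _ (by omega)]
      omega
    simp [PySem.Chars.upper, hu]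
  · refine List.mem_append_left _
      (List.mem_map.mpr ⟨a, pvMem_lowercase a (by omega) (by omega), ?_⟩)
    have hu : PySem.Chars.upperChar a = b := by
      rw [pvUpperChar_eq a (by omega) (by omega), pvChar_eq_iff,
        pvChar_toNat_ofNat _ (by omega)]
      omega
    simp [PySem.Chars.upper, hu]

set_option maxHeartbeats 800000 in
theorem pvPairs_good : ∀ pr ∈ pvPairs, ∃ c d, pr = [c, d] ∧ pvReacts c d = true := by
  intro pr hpr
  have hall : pvPairs.all
      (fun pr => match pr with | [c, d] => pvReacts c d | _ => false) = true := by decide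
  have hh := List.all_eq_true.mp hall pr hpr
  rcases pr with _ | ⟨c, _ | ⟨d, _ | ⟨e, t⟩⟩⟩
  · simp at hh
  · simp at hh
  · exact ⟨c, d, rfl, hh⟩
  · simp at hh

-- ---- replace = pvRemoveAll ----
theorem pvGo_eq (c d : Char) : ∀ (fuel : Nat) (l acc : List Char), l.length ≤ fuel →
    PySem.Chars.replace.go [c, d] [] fuel l acc = acc.reverse ++ pvRemoveAll c d l := by
  intro fuel
  induction fuel with
  | zero =>
    intro l acc hl
    have hnil : l = [] := List.eq_nil_of_length_eq_zero (Nat.le_zero.mp hl)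
    subst hnil
    rw [pvRemoveAll_nil]
    simp [PySem.Chars.replace.go]
  | succ n ih =>
    intro l acc hl
    match l with
    | [] =>
      rw [pvRemoveAll_nil]
      simp [PySem.Chars.replace.go]
    | [a] =>
      have hp : List.isPrefixOf [c, d] [a] = false := by
        simp [List.isPrefixOf]
      simp only [PySem.Chars.replace.go, hp, Bool.false_eq_true, if_false]
      rw [ih [] (a :: acc) (by simp), pvRemoveAll_singleton, pvRemoveAll_nil]
      simp
    | a :: b :: t =>
      by_cases hcd : a = c ∧ b = d
      · obtain ⟨rfl, rfl⟩ := hcd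
        have hp : List.isPrefixOf [a, b] (a :: b :: t) = true := by
          simp [List.isPrefixOf]
        simp only [PySem.Chars.replace.go, hp, if_true]
        show PySem.Chars.replace.go [a, b] [] n t acc = acc.reverse ++ pvRemoveAll a b (a :: b :: t)
        rw [ih t acc (by simp only [List.length_cons] at hl; omega)]
        have hr : pvRemoveAll a b (a :: b :: t) = pvRemoveAll a b t := by
          rw [pvRemoveAll, if_pos ⟨rfl, rfl⟩]
        rw [hr]
      · have hp : List.isPrefixOf [c, d] (a :: b :: t) = false := by
          simp [List.isPrefixOf]
          intro h1 h2
          exact absurd ⟨h1.symm, h2.symm⟩ hcd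
        simp only [PySem.Chars.replace.go, hp, Bool.false_eq_true, if_false]
        rw [ih (b :: t) (a :: acc) (by simp only [List.length_cons] at hl ⊢; omega)]
        have hr : pvRemoveAll c d (a :: b :: t) = a :: pvRemoveAll c d (b :: t) := by
          rw [pvRemoveAll, if_neg hcd]
        rw [hr]
        simp

theorem pvReplace_pair (c d : Char) (s : List Char) :
    PySem.Chars.replace s [c, d] [] = pvRemoveAll c d s := by
  unfold PySem.Chars.replace
  rw [if_neg (by simp)]
  rw [pvGo_eq c d s.length s [] (le_refl _)]
  simp

-- ---- pvRemoveAll structure ----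
theorem pvRemoveAll_length_le (c d : Char) (l : List Char) :
    (pvRemoveAll c d l).length ≤ l.length := by
  induction l using pvRemoveAll.induct c d with
  | case1 a b t h ih =>
    rw [pvRemoveAll, if_pos h]
    simp only [List.length_cons]
    omega
  | case2 a b t h ih =>
    rw [pvRemoveAll, if_neg h]
    simp only [List.length_cons] at ih ⊢
    omega
  | case3 l h =>
    rcases l with _ | ⟨a, _ | ⟨b, t⟩⟩
    · rw [pvRemoveAll_nil]
    · rw [pvRemoveAll_singleton]
    · exact (h a b t rfl).elim

theorem pvRemoveAll_eq_of_length (c d : Char) (l : List Char)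
    (h : (pvRemoveAll c d l).length = l.length) : pvRemoveAll c d l = l := by
  induction l using pvRemoveAll.induct c d with
  | case1 a b t hab ih =>
    rw [pvRemoveAll, if_pos hab] at h ⊢
    have := pvRemoveAll_length_le c d t
    simp only [List.length_cons] at h
    omega
  | case2 a b t hab ih =>
    rw [pvRemoveAll, if_neg hab] at h ⊢
    simp only [List.length_cons] at h
    rw [ih (by simp only [List.length_cons]; omega)]
  | case3 l hl =>
    rcases l with _ | ⟨a, _ | ⟨b, t⟩⟩
    · exact pvRemoveAll_nil c d
    · exact pvRemoveAll_singleton c d a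
    · exact (hl a b t rfl).elim

theorem pvRemoveAll_fix_chain (c d : Char) (l : List Char) (h : pvRemoveAll c d l = l) :
    List.IsChain (fun a b => ¬(a = c ∧ b = d)) l := by
  induction l using pvRemoveAll.induct c d with
  | case1 a b t hab ih =>
    rw [pvRemoveAll, if_pos hab] at h
    have h1 := pvRemoveAll_length_le c d t
    have h2 := congrArg List.length h
    simp only [List.length_cons] at h2
    omega
  | case2 a b t hab ih =>
    rw [pvRemoveAll, if_neg hab] at h
    have h2 : pvRemoveAll c d (b :: t) = b :: t := (List.cons.inj h).2
    exact List.isChain_cons_cons.mpr ⟨hab, ih h2⟩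
  | case3 l hl =>
    rcases l with _ | ⟨a, _ | ⟨b, t⟩⟩
    · exact .nil
    · exact .singleton _
    · exact (hl a b t rfl).elim

-- ---- stack lemmas ----
theorem pvStep_irred (st : List Char) (c : Char) (h : pvIrred st) : pvIrred (pvStep st c) := by
  cases st with
  | nil => exact .singleton _
  | cons t r =>
    simp only [pvStep]
    by_cases htc : pvReacts t c = true
    · rw [if_pos htc]
      exact (List.isChain_cons.mp h).2
    · rw [if_neg htc]
      have hf : pvReacts c t = false := by
        rw [pvReacts_symm]
        revert htc; cases pvReacts t c <;> simp
      exact List.isChain_cons_cons.mpr ⟨hf, h⟩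

theorem pvStep_cancel (st : List Char) (c d : Char) (hst : pvIrred st)
    (h : pvReacts c d = true) : pvStep (pvStep st c) d = st := by
  cases st with
  | nil => simp [pvStep, h]
  | cons t r =>
    simp only [pvStep]
    by_cases htc : pvReacts t c = true
    · rw [if_pos htc]
      have htd : t = d := pvReacts_trans_eq t c d htc h
      subst htd
      cases r with
      | nil => simp
      | cons a r2 =>
        have hta : pvReacts t a = false := (List.isChain_cons_cons.mp hst).1
        have hat : pvReacts a t = false := by rw [pvReacts_symm]; exact hta
        simp [hat]
    · rw [if_neg htc]
      simp [h]


theorem pvFold_removeAll (c d : Char) (h : pvReacts c d = true) :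
    ∀ (s st : List Char), pvIrred st →
      (pvRemoveAll c d s).foldl pvStep st = s.foldl pvStep st := by
  intro s
  induction s using pvRemoveAll.induct c d with
  | case1 a b t hab ih =>
    intro st hst
    obtain ⟨rfl, rfl⟩ := hab
    rw [pvRemoveAll, if_pos ⟨rfl, rfl⟩]
    rw [ih st hst]
    simp only [List.foldl]
    rw [pvStep_cancel st a b hst h]
  | case2 a b t hab ih =>
    intro st hst
    rw [pvRemoveAll, if_neg hab]
    simp only [List.foldl]
    exact ih (pvStep st a) (pvStep_irred st a hst)
  | case3 l hl =>
    intro st hst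
    rcases l with _ | ⟨a, _ | ⟨b, t⟩⟩
    · rw [pvRemoveAll_nil]
    · rw [pvRemoveAll_singleton]
    · exact (hl a b t rfl).elim

theorem pvFold_irred_self : ∀ (s st : List Char),
    List.IsChain (fun a b => pvReacts a b = false) (st.reverse ++ s) →
    s.foldl pvStep st = s.reverse ++ st := by
  intro s
  induction s with
  | nil => intro st h; simp
  | cons hc t ih =>
    intro st h
    cases st with
    | nil =>
      simp only [List.foldl, pvStep]
      rw [ih [hc] (by simpa using h)]
      simp
    | cons a r =>
      have hra : pvReacts a hc = false := by
        have h2 := h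
        rw [List.reverse_cons, List.append_assoc] at h2
        simp only [List.cons_append, List.nil_append] at h2
        exact (List.isChain_append_cons_cons.mp h2).2.1
      simp only [List.foldl, pvStep, hra, Bool.false_eq_true, if_false]
      rw [ih (hc :: a :: r) (by simpa [List.reverse_cons, List.append_assoc] using h)]
      simp

-- ---- replace pass lemmas ----
theorem pvPass_length_le : ∀ (ps : List (List Char)) (p : List Char),
    (∀ pr ∈ ps, ∃ c d, pr = [c, d] ∧ pvReacts c d = true) →
    (ps.foldl (fun poly pair => PySem.Chars.replace poly pair []) p).length ≤ p.length := by
  intro ps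
  induction ps with
  | nil => intro p _; exact le_refl _
  | cons q ps ih =>
    intro p hgood
    obtain ⟨c, d, rfl, _⟩ := hgood _ List.mem_cons_self
    simp only [List.foldl]
    rw [pvReplace_pair]
    exact le_trans (ih _ (fun pr hpr => hgood pr (List.mem_cons_of_mem _ hpr)))
      (pvRemoveAll_length_le c d p)

theorem pvPass_eq_of_length : ∀ (ps : List (List Char)) (p : List Char),
    (∀ pr ∈ ps, ∃ c d, pr = [c, d] ∧ pvReacts c d = true) →
    (ps.foldl (fun poly pair => PySem.Chars.replace poly pair []) p).length = p.length →
    ps.foldl (fun poly pair => PySem.Chars.replace poly pair []) p = p := by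
  intro ps
  induction ps with
  | nil => intro p _ _; rfl
  | cons q ps ih =>
    intro p hgood hlen
    obtain ⟨c, d, rfl, _⟩ := hgood _ List.mem_cons_self
    have hgood' : ∀ pr ∈ ps, ∃ c d, pr = [c, d] ∧ pvReacts c d = true :=
      fun pr hpr => hgood pr (List.mem_cons_of_mem _ hpr)
    simp only [List.foldl, pvReplace_pair] at hlen ⊢
    have h1 := pvPass_length_le ps (pvRemoveAll c d p) hgood'
    have h2 := pvRemoveAll_length_le c d p
    have h3 : pvRemoveAll c d p = p := pvRemoveAll_eq_of_length c d p (by omega)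
    rw [h3] at hlen ⊢
    exact ih p hgood' hlen

theorem pvPass_fix : ∀ (ps : List (List Char)) (p : List Char),
    (∀ pr ∈ ps, ∃ c d, pr = [c, d] ∧ pvReacts c d = true) →
    ps.foldl (fun poly pair => PySem.Chars.replace poly pair []) p = p →
    ∀ c d, [c, d] ∈ ps → pvRemoveAll c d p = p := by
  intro ps
  induction ps with
  | nil => intro p _ _ c d hmem; simp at hmem
  | cons q ps ih =>
    intro p hgood hfix
    obtain ⟨c0, d0, rfl, _⟩ := hgood _ List.mem_cons_self
    have hgood' : ∀ pr ∈ ps, ∃ c d, pr = [c, d] ∧ pvReacts c d = true :=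
      fun pr hpr => hgood pr (List.mem_cons_of_mem _ hpr)
    simp only [List.foldl, pvReplace_pair] at hfix
    have h1 := pvPass_length_le ps (pvRemoveAll c0 d0 p) hgood'
    have h2 := pvRemoveAll_length_le c0 d0 p
    have h4 := congrArg List.length hfix
    have h3 : pvRemoveAll c0 d0 p = p := pvRemoveAll_eq_of_length c0 d0 p (by omega)
    rw [h3] at hfix
    intro c d hmem
    rcases List.mem_cons.mp hmem with heq | htail
    · have hc : c = c0 ∧ d = d0 := by simpa using heq
      obtain ⟨rfl, rfl⟩ := hc
      exact h3
    · exact ih p hgood' hfix c d htail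

theorem pvPass_stack : ∀ (ps : List (List Char)) (p : List Char),
    (∀ pr ∈ ps, ∃ c d, pr = [c, d] ∧ pvReacts c d = true) →
    (ps.foldl (fun poly pair => PySem.Chars.replace poly pair []) p).foldl pvStep [] =
      p.foldl pvStep [] := by
  intro ps
  induction ps with
  | nil => intro p _; rfl
  | cons q ps ih =>
    intro p hgood
    obtain ⟨c, d, rfl, hre⟩ := hgood _ List.mem_cons_self
    have hgood' : ∀ pr ∈ ps, ∃ c d, pr = [c, d] ∧ pvReacts c d = true :=
      fun pr hpr => hgood pr (List.mem_cons_of_mem _ hpr)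
    simp only [List.foldl, pvReplace_pair]
    rw [ih (pvRemoveAll c d p) hgood']
    exact pvFold_removeAll c d hre p [] .nil

theorem pvFix_irred (p : List Char) (h : pvReplacePass p = p) : pvIrred p := by
  unfold pvReplacePass at h
  have hfix := pvPass_fix pvPairs p pvPairs_good h
  unfold pvIrred
  rw [List.isChain_iff_forall_rel_of_append_cons_cons]
  intro a b l1 l2 hdec
  cases hre : pvReacts a b with
  | false => rfl
  | true =>
    have hmem := pvReacts_mem_pairs a b hre
    have hchain := pvRemoveAll_fix_chain a b p (hfix a b hmem)
    have := List.isChain_iff_forall_rel_of_append_cons_cons.mp hchain hdec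
    exact absurd ⟨rfl, rfl⟩ this

-- ---- main loop ----
theorem pvLoopA_eq : ∀ (fuel : Nat) (p : List Char), p.length < fuel →
    pvLoopA fuel p p = ((p.foldl pvStep []).length : Int) := by
  intro fuel
  induction fuel with
  | zero => intro p hp; exact absurd hp (Nat.not_lt_zero _)
  | succ n ih =>
    intro p hp
    simp only [pvLoopA]
    by_cases heq : p = pvReplacePass p
    · rw [if_neg (by simpa using heq)]
      have hirr := pvFix_irred p heq.symm
      have hfold := pvFold_irred_self p [] (by simpa using hirr)
      rw [hfold, ← heq]
      simp
    · rw [if_pos (by simpa using heq)]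
      have hle := pvPass_length_le pvPairs p pvPairs_good
      have hne2 : (pvReplacePass p).length ≠ p.length := fun hlen =>
        heq (pvPass_eq_of_length pvPairs p pvPairs_good hlen).symm
      unfold pvReplacePass at hle hne2 ⊢
      rw [ih _ (by omega)]
      rw [pvPass_stack pvPairs p pvPairs_good]

-- ===== VERDICT (by name: the statement is the Claim_ definition above) =====
theorem get_polymer_length_spec : Claim_equal_get_polymer_length := by
  intro polymer _
  unfold Spec_get_polymer_length get_polymer_length get_polymer_length_alt
  exact pvLoopA_eq _ _ (Nat.lt_succ_self _)
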